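-- pv_equiv track=rewrite | github.com/MericD/Bitcoin-Transaction-Parser | Diagram/hex_converting.py | docproof
-- ===== SOURCE A (Python) =====
-- def docproof(bin_dec):
--     sub = ('DOCPROOF','FACTOM00' ,'Factom!!', 'Fa', 'CryptoTests-',
--         'CryptoProof-', 'STAMPD##', 'BITPROOF', 'ProveBit', 'RMBe', 'RMBd', 'ORIGMY', 'LaPreuve', 'UNicDC',
--         'S1', 'S2', 'S3', 'S4', 'S5', 'BS', 'FA' )
--     if any(str(bin_dec).startswith(i) for i in sub):
--         return True
--     elif any(str(bin_dec).startswith('b"'+i)  for i in sub):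
--         return True
--     elif any(str(bin_dec).startswith("""b'"""+i)  for i in sub):
--         return True
--     else:
--         return False
-- ===== SOURCE B (Python) =====
-- def docproof(bin_dec):
--     sub = ('DOCPROOF', 'FACTOM00', 'Factom!!', 'Fa', 'CryptoTests-',
--            'CryptoProof-', 'STAMPD##', 'BITPROOF', 'ProveBit', 'RMBe', 'RMBd', 'ORIGMY', 'LaPreuve', 'UNicDC',
--            'S1', 'S2', 'S3', 'S4', 'S5', 'BS', 'FA')
--     s = str(bin_dec)
--     if s.startswith('b"') or s.startswith("b'"):
--         s = s[2:]
--     return s.startswith(sub)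
-- ===== Notes on version B (the rewrite author's own statement) =====
-- stated objective: simpler
-- what changed: B normalizes the string once (stripping a leading b" or b' if present) and then does a single tuple startswith check, instead of A's three separate any()-scans over the 21 prefixes; correctness uses that no prefix begins with a lowercase b-quote.
import Mathlib
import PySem

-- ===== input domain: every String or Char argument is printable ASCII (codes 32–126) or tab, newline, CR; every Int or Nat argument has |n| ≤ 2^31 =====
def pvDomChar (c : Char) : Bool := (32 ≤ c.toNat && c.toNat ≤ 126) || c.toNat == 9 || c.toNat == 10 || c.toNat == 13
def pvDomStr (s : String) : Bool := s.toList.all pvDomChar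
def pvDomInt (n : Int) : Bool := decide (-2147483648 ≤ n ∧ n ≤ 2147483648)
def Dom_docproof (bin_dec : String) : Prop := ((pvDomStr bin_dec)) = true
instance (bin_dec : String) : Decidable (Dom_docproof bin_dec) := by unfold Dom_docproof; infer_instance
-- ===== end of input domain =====

-- B normalizes once (strips a leading b" or b' if present) then does ONE prefix scan,
-- instead of A's three independent any()-scans; objective: simpler.

def pvSub : List String :=
  ["DOCPROOF", "FACTOM00", "Factom!!", "Fa", "CryptoTests-",
   "CryptoProof-", "STAMPD##", "BITPROOF", "ProveBit", "RMBe", "RMBd", "ORIGMY", "LaPreuve", "UNicDC",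
   "S1", "S2", "S3", "S4", "S5", "BS", "FA"]

-- ===== PORT A =====
def docproof (bin_dec : String) : Bool :=
  if pvSub.any (fun i => PySem.Str.startswith bin_dec i) then true
  else if pvSub.any (fun i => PySem.Str.startswith bin_dec ("b\"" ++ i)) then true
  else if pvSub.any (fun i => PySem.Str.startswith bin_dec ("b'" ++ i)) then true
  else false

-- ===== PORT B =====
def docproof_alt (bin_dec : String) : Bool :=
  let s :=
    if PySem.Str.startswith bin_dec "b\"" || PySem.Str.startswith bin_dec "b'" then
      PySem.Str.slice bin_dec (some 2) none
    else bin_dec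
  pvSub.any (fun i => PySem.Str.startswith s i)

-- ===== PRECONDITION & SPEC =====
def Spec_docproof (bin_dec : String) (out : Bool) : Prop := out = docproof_alt bin_dec
instance (bin_dec : String) (out : Bool) : Decidable (Spec_docproof bin_dec out) := by unfold Spec_docproof; infer_instance

-- ===== CLAIM (what is proved, stated in full; the proofs are below) =====
def Claim_equal_docproof : Prop := ∀ (bin_dec : String), Dom_docproof bin_dec → Spec_docproof bin_dec (docproof bin_dec)

-- ===== LEMMAS AND PROOFS =====

-- every prefix in pvSub is nonempty and does not start with 'b'
theorem pvSub_no_b : ∀ i ∈ pvSub, i.toList ≠ [] ∧ i.toList.head? ≠ some 'b' := by decide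

theorem head_of_prefix {i : List Char} {c : Char} {l : List Char}
    (h : i <+: c :: l) (hne : i ≠ []) : i.head? = some c := by
  cases i with
  | nil => exact absurd rfl hne
  | cons a as =>
    obtain ⟨rfl, -⟩ := List.cons_prefix_cons.mp h
    rfl

-- no pvSub prefix matches a string whose first char is 'b'
theorem scan_quoted (q : Char) (t : List Char) :
    (pvSub.any (fun i => PySem.Chars.startswith ('b' :: q :: t) i.toList)) = false := by
  rw [List.any_eq_false]
  intro i hi
  simp only [← Bool.not_eq_true, PySem.Chars.startswith_iff]
  intro h
  obtain ⟨hne, hhd⟩ := pvSub_no_b i hi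
  exact hhd (head_of_prefix h hne)

theorem sw_append2 (a b : Char) (i l : List Char) :
    PySem.Chars.startswith l (a :: b :: i) =
      ((l.take 2 == [a, b]) && PySem.Chars.startswith (l.drop 2) i) := by
  rw [Bool.eq_iff_iff]
  simp only [Bool.and_eq_true, beq_iff_eq, PySem.Chars.startswith_iff]
  cases l with
  | nil => simp
  | cons c l' =>
    cases l' with
    | nil => simp [List.cons_prefix_cons]
    | cons d r =>
      simp only [List.take, List.drop, List.cons_prefix_cons, List.cons.injEq, and_true]
      constructor
      · rintro ⟨rfl, rfl, h⟩; exact ⟨⟨rfl, rfl⟩, h⟩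
      · rintro ⟨⟨rfl, rfl⟩, h⟩; exact ⟨rfl, rfl, h⟩

theorem sw_nil (l : List Char) : PySem.Chars.startswith l ([] : List Char) = true :=
  (PySem.Chars.startswith_iff l []).mpr (List.nil_prefix)

-- ===== VERDICT (by name: the statement is the Claim_ definition above) =====
theorem docproof_spec : Claim_equal_docproof := by
  intro s _
  unfold Spec_docproof docproof docproof_alt
  have hbq : ("b\"" : String).toList = ['b', '"'] := rfl
  have hbs : ("b'" : String).toList = ['b', '\''] := rfl
  have hsl : PySem.List.slice s.toList (some (2:Int)) none = s.toList.drop 2 := by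
    exact_mod_cast PySem.List.slice_from_natCast s.toList 2
  simp only [PySem.Str.startswith_eq, String.toList_append, hbq, hbs,
    List.cons_append, List.nil_append, sw_append2, sw_nil, Bool.and_true]
  by_cases h1 : s.toList.take 2 = ['b', '"']
  · have hcs : s.toList = 'b' :: '"' :: s.toList.drop 2 := by
      conv_lhs => rw [← List.take_append_drop 2 s.toList, h1]
      rfl
    have f1 : pvSub.any (fun i => PySem.Chars.startswith s.toList i.toList) = false := by
      rw [hcs]; exact scan_quoted '"' _
    simp [h1, f1, List.any_eq, hsl]
  · by_cases h2 : s.toList.take 2 = ['b', '\'']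
    · have hcs : s.toList = 'b' :: '\'' :: s.toList.drop 2 := by
        conv_lhs => rw [← List.take_append_drop 2 s.toList, h2]
        rfl
      have f1 : pvSub.any (fun i => PySem.Chars.startswith s.toList i.toList) = false := by
        rw [hcs]; exact scan_quoted '\'' _
      simp [h1, h2, List.any_eq, hsl]
      intro x hx hsw
      exact absurd hsw (List.any_eq_false.mp f1 x hx)
    · simp [h1, h2, List.any_eq]
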